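-- pv_equiv track=rewrite | github.com/ricardoamferreira/AskMyRace | backend/app/main.py | _select_transition2_notes
-- ===== SOURCE A (Python) =====
-- from typing import Deque, Dict, Iterable, List, Tuple
--
-- def _select_transition2_notes(entries: List[tuple[str | None, str]]) -> List[str]:
--     friday = [item for item in entries if item[0] and "friday" in item[0].lower()]
--     saturday = [item for item in entries if item[0] and "saturday" in item[0].lower()]
--     notes = []
--     if friday:
--         day_label, time_range = friday[0]
--         notes.append(f"Transition 2 red-bag check-in ({day_label}): {time_range}")
--     if saturday:
--         day_label, time_range = saturday[0]
--         notes.append(f"Transition 2 red-bag check-in ({day_label}): {time_range}")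
--     if not notes:
--         for day_label, time_range in entries[:2]:
--             notes.append(f"Transition 2 red-bag check-in ({day_label or 'Pre-race'}): {time_range}")
--     return notes
-- ===== SOURCE B (Python) =====
-- def _select_transition2_notes(entries):
--     first_friday = None
--     first_saturday = None
--     for item in entries:
--         label = item[0]
--         if label:
--             low = label.lower()
--             if first_friday is None and "friday" in low:
--                 first_friday = item
--             if first_saturday is None and "saturday" in low:
--                 first_saturday = item
--             if first_friday is not None and first_saturday is not None:
--                 break
--     notes = []
--     for found in (first_friday, first_saturday):
--         if found is not None:
--             notes.append(f"Transition 2 red-bag check-in ({found[0]}): {found[1]}")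
--     if notes:
--         return notes
--     return [
--         f"Transition 2 red-bag check-in ({d or 'Pre-race'}): {t}"
--         for d, t in entries[:2]
--     ]
-- ===== Notes on version B (the rewrite author's own statement) =====
-- stated objective: alternative
-- what changed: Replaces the two full-list comprehensions with one early-exit pass keeping the first friday and first saturday entries, and builds the fallback with a comprehension over entries[:2] instead of an append loop.
import Mathlib
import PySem

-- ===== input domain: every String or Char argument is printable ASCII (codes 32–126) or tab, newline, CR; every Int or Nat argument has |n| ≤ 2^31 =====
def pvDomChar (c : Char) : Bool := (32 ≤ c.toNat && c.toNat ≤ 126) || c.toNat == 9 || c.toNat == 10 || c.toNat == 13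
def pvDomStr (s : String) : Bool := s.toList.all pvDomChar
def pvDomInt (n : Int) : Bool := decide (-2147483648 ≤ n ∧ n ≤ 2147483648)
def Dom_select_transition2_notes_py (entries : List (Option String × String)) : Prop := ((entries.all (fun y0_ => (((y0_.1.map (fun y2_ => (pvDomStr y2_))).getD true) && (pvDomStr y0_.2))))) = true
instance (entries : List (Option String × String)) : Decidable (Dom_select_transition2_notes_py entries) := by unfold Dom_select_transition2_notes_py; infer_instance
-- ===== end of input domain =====

-- B replaces A's two full-list comprehensions with one early-exit scan keeping the first
-- friday/saturday entries (alternative decomposition, same cost).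


-- ===== PORT A =====
-- 'item[0] and "<day>" in item[0].lower()' — truthiness of str|None plus substring test
def pvHasDay (day : String) (item : Option String × String) : Bool :=
  match item.1 with
  | some s => (!(s == "")) && PySem.Str.isIn day (PySem.Str.lower s)
  | none => false

-- the f-string body (identical in both Pythons)
def pvNote (day time : String) : String :=
  "Transition 2 red-bag check-in (" ++ day ++ "): " ++ time

-- 'day_label or "Pre-race"' in the fallback
def pvOrPre (d : Option String) : String :=
  match d with
  | some s => if s == "" then "Pre-race" else s
  | none => "Pre-race"

def select_transition2_notes_py (entries : List (Option String × String)) : List String :=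
  let friday := entries.filter (pvHasDay "friday")
  let saturday := entries.filter (pvHasDay "saturday")
  let notes : List String := []
  -- 'if friday: …' (friday[0]'s label is always a truthy str here; .getD "" only discharges the Option)
  let notes := match friday with
    | (d, t) :: _ => notes ++ [pvNote (d.getD "") t]
    | [] => notes
  let notes := match saturday with
    | (d, t) :: _ => notes ++ [pvNote (d.getD "") t]
    | [] => notes
  if notes.isEmpty then
    (PySem.List.slice entries none (some 2)).foldl
      (fun acc (p : Option String × String) => acc ++ [pvNote (pvOrPre p.1) p.2]) notes
  else notes

-- ===== PORT B =====
-- single early-exit pass: keep the first friday and first saturday entries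
def pvScan (l : List (Option String × String))
    (ff fs : Option (Option String × String)) :
    Option (Option String × String) × Option (Option String × String) :=
  match l with
  | [] => (ff, fs)
  | item :: rest =>
    let ff' := if ff.isNone && pvHasDay "friday" item then some item else ff
    let fs' := if fs.isNone && pvHasDay "saturday" item then some item else fs
    if ff'.isSome && fs'.isSome then (ff', fs') else pvScan rest ff' fs'

def select_transition2_notes_py_alt (entries : List (Option String × String)) : List String :=
  let (ff, fs) := pvScan entries none none
  let notes :=
    (match ff with | some (d, t) => [pvNote (d.getD "") t] | none => []) ++
    (match fs with | some (d, t) => [pvNote (d.getD "") t] | none => [])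
  if notes.isEmpty then
    (PySem.List.slice entries none (some 2)).map (fun p => pvNote (pvOrPre p.1) p.2)
  else notes

-- ===== PRECONDITION & SPEC =====
def Spec_select_transition2_notes_py (entries : List (Option String × String)) (out : List String) : Prop := out = select_transition2_notes_py_alt entries
instance (entries : List (Option String × String)) (out : List String) : Decidable (Spec_select_transition2_notes_py entries out) := by unfold Spec_select_transition2_notes_py; infer_instance

-- ===== CLAIM (what is proved, stated in full; the proofs are below) =====
def Claim_equal_select_transition2_notes_py : Prop := ∀ (entries : List (Option String × String)), Dom_select_transition2_notes_py entries → Spec_select_transition2_notes_py entries (select_transition2_notes_py entries)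

-- ===== LEMMAS AND PROOFS =====

-- the early-exit scan returns the heads of A's two filtered lists
theorem pvScan_eq (l : List (Option String × String))
    (ff fs : Option (Option String × String)) :
    pvScan l ff fs =
      (ff.or (l.filter (pvHasDay "friday")).head?,
       fs.or (l.filter (pvHasDay "saturday")).head?) := by
  induction l generalizing ff fs with
  | nil => simp [pvScan]
  | cons item rest ih =>
    simp only [pvScan]
    set ff' := if ff.isNone && pvHasDay "friday" item then some item else ff with hff'
    set fs' := if fs.isNone && pvHasDay "saturday" item then some item else fs with hfs'
    have hf : ff'.or ((rest.filter (pvHasDay "friday")).head?) =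
        ff.or (((item :: rest).filter (pvHasDay "friday")).head?) := by
      rw [hff']; cases ff <;> cases h : pvHasDay "friday" item <;> simp [h]
    have hs : fs'.or ((rest.filter (pvHasDay "saturday")).head?) =
        fs.or (((item :: rest).filter (pvHasDay "saturday")).head?) := by
      rw [hfs']; cases fs <;> cases h : pvHasDay "saturday" item <;> simp [h]
    split
    · rename_i hb
      obtain ⟨h1, h2⟩ := Bool.and_eq_true _ _ |>.mp hb
      have e1 : ff'.or ((rest.filter (pvHasDay "friday")).head?) = ff' := by
        cases hc : ff' with
        | none => rw [hc] at h1; simp at h1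
        | some a => simp
      have e2 : fs'.or ((rest.filter (pvHasDay "saturday")).head?) = fs' := by
        cases hc : fs' with
        | none => rw [hc] at h2; simp at h2
        | some a => simp
      rw [← hf, ← hs, e1, e2]
    · rw [ih, hf, hs]

theorem select_transition2_notes_py_eq (entries : List (Option String × String)) :
    select_transition2_notes_py entries = select_transition2_notes_py_alt entries := by
  unfold select_transition2_notes_py select_transition2_notes_py_alt
  rw [pvScan_eq]
  simp only [Option.or]
  have hfold : ∀ (l : List (Option String × String)) (acc : List String),
      l.foldl (fun acc (p : Option String × String) => acc ++ [pvNote (pvOrPre p.1) p.2]) acc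
        = acc ++ l.map (fun p => pvNote (pvOrPre p.1) p.2) := by
    intro l
    induction l with
    | nil => simp
    | cons x xs ih => intro acc; simp [ih]
  cases hF : (entries.filter (pvHasDay "friday")).head? with
  | none =>
    cases hS : (entries.filter (pvHasDay "saturday")).head? with
    | none =>
      simp [List.head?_eq_none_iff.mp hF,
            List.head?_eq_none_iff.mp hS, hfold]
    | some q =>
      obtain ⟨qs, hqs⟩ := List.head?_eq_some_iff.mp hS
      rw [List.head?_eq_none_iff.mp hF, hqs]
      cases q with | mk d t => simp
  | some p =>
    obtain ⟨ps, hps⟩ := List.head?_eq_some_iff.mp hF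
    rw [hps]
    cases hS : (entries.filter (pvHasDay "saturday")).head? with
    | none =>
      rw [List.head?_eq_none_iff.mp hS]
      cases p with | mk d t => simp
    | some q =>
      obtain ⟨qs, hqs⟩ := List.head?_eq_some_iff.mp hS
      rw [hqs]
      cases p with | mk d t => cases q with | mk d' t' => simp

-- ===== VERDICT (by name: the statement is the Claim_ definition above) =====
theorem select_transition2_notes_py_spec : Claim_equal_select_transition2_notes_py := by
  intro entries _
  unfold Spec_select_transition2_notes_py
  exact select_transition2_notes_py_eq entries
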